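-- pv_equiv track=rewrite | github.com/audit-biais/greenaudit | backend/app/services/scoring.py | compute_verdict_counts
-- ===== SOURCE A (Python) =====
-- from typing import Dict, Tuple
--
-- def compute_verdict_counts(
--     verdicts: list,
-- ) -> Dict[str, int]:
--     """
--     Compte les verdicts des claims.
--
--     Args:
--         verdicts: liste de overall_verdict (str) de chaque claim
--
--     Returns:
--         {"conforme": n, "risque": n, "non_conforme": n}
--     """
--     counts = {"conforme": 0, "risque": 0, "non_conforme": 0}
--     for v in verdicts:
--         if v in counts:
--             counts[v] += 1
--     return counts
-- ===== SOURCE B (Python) =====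
-- def compute_verdict_counts(verdicts: list):
--     """Divide-and-conquer: recursively count the three verdicts on each half
--     of the list and merge the (conforme, risque, non_conforme) triples."""
--     def count3(xs):
--         if len(xs) <= 1:
--             if not xs:
--                 return (0, 0, 0)
--             v = xs[0]
--             return (1 if v == "conforme" else 0,
--                     1 if v == "risque" else 0,
--                     1 if v == "non_conforme" else 0)
--         m = len(xs) // 2
--         l = count3(xs[:m])
--         r = count3(xs[m:])
--         return (l[0] + r[0], l[1] + r[1], l[2] + r[2])
--     c, rq, nc = count3(verdicts)
--     return {"conforme": c, "risque": rq, "non_conforme": nc}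
-- ===== Notes on version B (the rewrite author's own statement) =====
-- stated objective: alternative
-- what changed: Replaced the single accumulating dict-tally loop by a divide-and-conquer recursion that splits the list in half, counts each half into a (conforme, risque, non_conforme) triple and merges the triples by addition.
import Mathlib
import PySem

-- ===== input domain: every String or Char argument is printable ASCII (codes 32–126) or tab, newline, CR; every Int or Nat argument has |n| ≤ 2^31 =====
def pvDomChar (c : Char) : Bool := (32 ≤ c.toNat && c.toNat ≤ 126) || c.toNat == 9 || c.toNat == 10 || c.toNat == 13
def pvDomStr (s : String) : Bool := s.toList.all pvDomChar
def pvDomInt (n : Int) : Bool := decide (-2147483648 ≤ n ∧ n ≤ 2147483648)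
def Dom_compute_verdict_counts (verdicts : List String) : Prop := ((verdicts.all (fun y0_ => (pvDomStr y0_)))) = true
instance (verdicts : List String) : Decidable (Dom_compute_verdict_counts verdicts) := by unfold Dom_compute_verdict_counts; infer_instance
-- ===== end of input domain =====

-- B replaces A's single accumulating dict-tally loop by a divide-and-conquer recursion
-- merging per-half (conforme, risque, non_conforme) triples (alternative decomposition).

-- ===== PORT A =====
-- counts = {...}; for v in verdicts: if v in counts: counts[v] += 1; return counts
def compute_verdict_counts (verdicts : List String) : List (String × Int) :=
  (verdicts.foldl
    (fun counts v => if counts.contains v then counts.modify v 0 (· + 1) else counts)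
    (PySem.Dict.ofList [("conforme", 0), ("risque", 0), ("non_conforme", 0)])).items

-- ===== PORT B =====
-- def count3(xs): base cases for len <= 1, else split at len//2, recurse on xs[:m], xs[m:], add triples
def pvCount3 (xs : List String) : Int × Int × Int :=
  if h : xs.length ≤ 1 then
    match xs with
    | [] => (0, 0, 0)
    | v :: _ =>
      ((if v = "conforme" then 1 else 0),
       (if v = "risque" then 1 else 0),
       (if v = "non_conforme" then 1 else 0))
  else
    let m := xs.length / 2
    let l := pvCount3 (xs.take m)
    let r := pvCount3 (xs.drop m)
    (l.1 + r.1, l.2.1 + r.2.1, l.2.2 + r.2.2)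
termination_by xs.length
decreasing_by
  · simp; omega
  · simp; omega

def compute_verdict_counts_alt (verdicts : List String) : List (String × Int) :=
  let t := pvCount3 verdicts
  [("conforme", t.1), ("risque", t.2.1), ("non_conforme", t.2.2)]

-- ===== PRECONDITION & SPEC =====
def Spec_compute_verdict_counts (verdicts : List String) (out : List (String × Int)) : Prop := out = compute_verdict_counts_alt verdicts
instance (verdicts : List String) (out : List (String × Int)) : Decidable (Spec_compute_verdict_counts verdicts out) := by unfold Spec_compute_verdict_counts; infer_instance

-- ===== CLAIM (what is proved, stated in full; the proofs are below) =====
def Claim_equal_compute_verdict_counts : Prop := ∀ (verdicts : List String), Dom_compute_verdict_counts verdicts → Spec_compute_verdict_counts verdicts (compute_verdict_counts verdicts)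

-- ===== LEMMAS AND PROOFS =====

-- B's recursion computes the three occurrence counts.
theorem pvCount3_eq (xs : List String) :
    pvCount3 xs = ((xs.count "conforme" : Int), (xs.count "risque" : Int), (xs.count "non_conforme" : Int)) := by
  fun_induction pvCount3 xs with
  | case1 h hm =>
    simp_all
  | case2 v t hle hle2 =>
    have ht : t = [] := by simp at hle; exact hle
    subst ht
    by_cases h1 : v = "conforme" <;> by_cases h2 : v = "risque" <;>
      by_cases h3 : v = "non_conforme" <;> simp_all [eq_comm]
  | case3 xs h m l r ihl ihr =>
    have hsplit : xs = xs.take m ++ xs.drop m := (List.take_append_drop m xs).symm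
    simp only [l, r] at *
    rw [ihl, ihr]
    refine Prod.ext ?_ (Prod.ext ?_ ?_) <;> simp <;>
      (conv_rhs => rw [hsplit]) <;> push_cast [List.count_append] <;> ring

-- A's loop, started on the literal three-key dict, ends with each value bumped by that key's count.
theorem foldA_items (l : List String) (a b c : Int) :
    (l.foldl
      (fun counts v => if counts.contains v then counts.modify v 0 (· + 1) else counts)
      (PySem.Dict.mk [("conforme", a), ("risque", b), ("non_conforme", c)])).items
    = [("conforme", a + l.count "conforme"),
       ("risque", b + l.count "risque"),
       ("non_conforme", c + l.count "non_conforme")] := by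
  induction l generalizing a b c with
  | nil => simp
  | cons v t ih =>
    simp only [List.foldl_cons]
    by_cases h1 : v = "conforme"
    · subst h1
      rw [show (if (PySem.Dict.mk [("conforme", a), ("risque", b), ("non_conforme", c)]).contains "conforme" then (PySem.Dict.mk [("conforme", a), ("risque", b), ("non_conforme", c)]).modify "conforme" 0 (· + 1) else PySem.Dict.mk [("conforme", a), ("risque", b), ("non_conforme", c)]) = PySem.Dict.mk [("conforme", a + 1), ("risque", b), ("non_conforme", c)] from rfl]
      rw [ih]
      simp
      ring
    · by_cases h2 : v = "risque"
      · subst h2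
        rw [show (if (PySem.Dict.mk [("conforme", a), ("risque", b), ("non_conforme", c)]).contains "risque" then (PySem.Dict.mk [("conforme", a), ("risque", b), ("non_conforme", c)]).modify "risque" 0 (· + 1) else PySem.Dict.mk [("conforme", a), ("risque", b), ("non_conforme", c)]) = PySem.Dict.mk [("conforme", a), ("risque", b + 1), ("non_conforme", c)] from rfl]
        rw [ih]
        simp
        ring
      · by_cases h3 : v = "non_conforme"
        · subst h3
          rw [show (if (PySem.Dict.mk [("conforme", a), ("risque", b), ("non_conforme", c)]).contains "non_conforme" then (PySem.Dict.mk [("conforme", a), ("risque", b), ("non_conforme", c)]).modify "non_conforme" 0 (· + 1) else PySem.Dict.mk [("conforme", a), ("risque", b), ("non_conforme", c)]) = PySem.Dict.mk [("conforme", a), ("risque", b), ("non_conforme", c + 1)] from rfl]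
          rw [ih]
          simp
          ring
        · have hc : (PySem.Dict.mk [("conforme", a), ("risque", b), ("non_conforme", c)]).contains v = false := by
            simp [PySem.Dict.contains]
            exact ⟨fun h => h1 h.symm, fun h => h2 h.symm, fun h => h3 h.symm⟩
          rw [if_neg (by simp [hc])]
          rw [ih]
          simp [h1, h2, h3]

-- ===== VERDICT (by name: the statement is the Claim_ definition above) =====
theorem compute_verdict_counts_spec : Claim_equal_compute_verdict_counts := by
  intro verdicts _
  show compute_verdict_counts verdicts = compute_verdict_counts_alt verdicts
  unfold compute_verdict_counts compute_verdict_counts_alt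
  rw [pvCount3_eq]
  rw [show PySem.Dict.ofList [("conforme", (0:Int)), ("risque", 0), ("non_conforme", 0)] = PySem.Dict.mk [("conforme", 0), ("risque", 0), ("non_conforme", 0)] from rfl]
  rw [foldA_items]
  simp
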